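-- pv_equiv track=rewrite | github.com/beaulieub58/personal_projects | Python/Project/Practice Questions/GPT_Random_AE_Interview_Question_3_11_1020AM.py | harderUserActivitySummar
-- ===== SOURCE A (Python) =====
-- from collections import defaultdict
--
-- def harderUserActivitySummar(events: list[dict]) -> dict:
--     hash_map = defaultdict(lambda: defaultdict(int))
--     for event in events:
--         hash_map[event['user']][event['action']] += 1
--     simple_hash = {}
--     for user, action in hash_map.items():
--         simple_hash[user] = max(action, key=action.get)
--     return simple_hash
-- ===== SOURCE B (Python) =====
-- def harderUserActivitySummar(events: list[dict]) -> dict: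
--     # Brute force, no counting dicts: handle each user at its first event,
--     # scan its action list and keep the first action whose total count is
--     # strictly larger than the current best's.
--     pairs = [(e['user'], e['action']) for e in events]
--     result = {}
--     for user, action in pairs:
--         if user in result:
--             continue
--         acts = [a for u, a in pairs if u == user]
--         best = action
--         for a in acts:
--             if acts.count(best) < acts.count(a):
--                 best = a
--         result[user] = best
--     return result
-- ===== Notes on version B (the rewrite author's own statement) =====
-- stated objective: alternative
-- what changed: Drops all counting dictionaries: B handles each user at its first event, extracts that user's action list and picks the winner by brute-force list.count scanning with strict <, which reproduces A's first-appearance tie-break without any hash counters.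
import Mathlib
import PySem

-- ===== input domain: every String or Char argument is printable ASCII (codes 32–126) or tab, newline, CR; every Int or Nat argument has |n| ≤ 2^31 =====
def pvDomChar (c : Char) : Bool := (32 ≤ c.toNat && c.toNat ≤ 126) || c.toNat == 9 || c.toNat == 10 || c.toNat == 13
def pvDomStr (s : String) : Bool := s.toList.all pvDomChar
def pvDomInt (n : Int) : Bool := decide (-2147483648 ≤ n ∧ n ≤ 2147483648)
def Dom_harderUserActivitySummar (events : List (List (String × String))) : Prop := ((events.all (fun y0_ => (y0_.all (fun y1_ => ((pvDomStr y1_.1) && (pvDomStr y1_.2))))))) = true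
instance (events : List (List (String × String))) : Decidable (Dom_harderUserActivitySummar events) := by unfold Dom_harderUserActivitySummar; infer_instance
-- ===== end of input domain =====

-- B drops all counting dictionaries: it handles each user at its first event and picks the winner by
-- brute-force list.count scanning with strict < (same return value; alternative, quadratic instead of linear).

-- event['k'] on the association-list encoding of a Python dict: first match (Pre_ guarantees presence,
-- so the "" default is never consulted on admitted inputs).
def pvField (e : List (String × String)) (k : String) : String :=
  (List.lookup k e).getD ""

-- ===== PORT A =====
-- hash_map = defaultdict(lambda: defaultdict(int)); for event: hash_map[event['user']][event['action']] += 1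
def aHashMap (events : List (List (String × String))) : PySem.Dict String (PySem.Dict String Int) :=
  events.foldl
    (fun hm e =>
      hm.insert (pvField e "user")
        ((hm.getD (pvField e "user") PySem.Dict.empty).modify (pvField e "action") 0 (· + 1)))
    PySem.Dict.empty

def harderUserActivitySummar (events : List (List (String × String))) : List (String × String) :=
  -- simple_hash[user] = max(action, key=action.get); iterating a dict yields its keys, and
  -- action.get(k) is the stored count for every key k, so the key function is getD k 0 (exact here).
  ((aHashMap events).items.foldl
    (fun sh p =>
      sh.insert p.1 ((PySem.List.max? p.2.keys (fun k => p.2.getD k 0)).getD ""))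
    PySem.Dict.empty).items

-- ===== PORT B =====
-- pairs = [(e['user'], e['action']) for e in events]; for user, action in pairs:
--   if user in result: continue; acts = [a for u, a in pairs if u == user];
--   best = action; for a in acts: if acts.count(best) < acts.count(a): best = a; result[user] = best
def harderUserActivitySummar_alt (events : List (List (String × String))) : List (String × String) :=
  let pairs := events.map (fun e => (pvField e "user", pvField e "action"))
  (pairs.foldl
    (fun result p =>
      if result.contains p.1 then result
      else
        let acts := (pairs.filter (fun q => q.1 == p.1)).map Prod.snd
        result.insert p.1
          (acts.foldl (fun best a => if acts.count best < acts.count a then a else best) p.2))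
    PySem.Dict.empty).items

-- ===== PRECONDITION & SPEC =====
-- Pre_ excludes exactly the events lacking a 'user' or 'action' key, on which A raises KeyError.
def Pre_harderUserActivitySummar (events : List (List (String × String))) : Prop :=
  ∀ e ∈ events, (List.lookup "user" e).isSome ∧ (List.lookup "action" e).isSome
instance (events : List (List (String × String))) : Decidable (Pre_harderUserActivitySummar events) := by
  unfold Pre_harderUserActivitySummar; infer_instance

def pvWitness_harderUserActivitySummar : (List (List (String × String))) :=
  [[("user", "u"), ("action", "a")], [("user", "u"), ("action", "b")], [("user", "u"), ("action", "b")]]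

def Spec_harderUserActivitySummar (events : List (List (String × String))) (out : List (String × String)) : Prop := out = harderUserActivitySummar_alt events
instance (events : List (List (String × String))) (out : List (String × String)) : Decidable (Spec_harderUserActivitySummar events out) := by unfold Spec_harderUserActivitySummar; infer_instance

-- ===== CLAIM (what is proved, stated in full; the proofs are below) =====
def Claim_equal_harderUserActivitySummar : Prop := ∀ (events : List (List (String × String))), Dom_harderUserActivitySummar events → Pre_harderUserActivitySummar events → Spec_harderUserActivitySummar events (harderUserActivitySummar events)

-- ===== LEMMAS AND PROOFS =====

-- the stream of (user, action) pairs both programs read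
def pvPairs (events : List (List (String × String))) : List (String × String) :=
  events.map (fun e => (pvField e "user", pvField e "action"))

-- the actions of user u, in event order
def pvActs (ps : List (String × String)) (u : String) : List String :=
  (ps.filter (fun p => p.1 == u)).map Prod.snd

-- B's per-user selection: scan the user's action list, strict < on counts, seeded by the first action
def pvSel (ps : List (String × String)) (p : String × String) : String :=
  (pvActs ps p.1).foldl
    (fun best a => if (pvActs ps p.1).count best < (pvActs ps p.1).count a then a else best) p.2

-- elements of t not in S, first occurrences, in order (the list PySem.Set.add builds past S)
def pvNewOf (S : List String) : List String → List String
  | [] => []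
  | a :: t => if a ∈ S then pvNewOf S t else a :: pvNewOf (S ++ [a]) t

-- first occurrence (pair) in t of each user outside K, in order
def pvFirstOcc (K : List String) : List (String × String) → List (String × String)
  | [] => []
  | p :: t => if p.1 ∈ K then pvFirstOcc K t else p :: pvFirstOcc (K ++ [p.1]) t

theorem pvFoldlAdd (t : List String) (s : PySem.Set String) :
    t.foldl PySem.Set.add s = s ++ pvNewOf s t := by
  induction t generalizing s with
  | nil => simp [pvNewOf]
  | cons a t ih =>
    rw [List.foldl_cons, PySem.Set.add_eq_ite]
    by_cases h : a ∈ s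
    · simp [pvNewOf, h, ih]
    · simp [pvNewOf, h, ih]

theorem pvOfList_eq_newOf (xs : List String) :
    PySem.Set.ofList xs = pvNewOf [] xs := by
  have h := pvFoldlAdd xs []
  simpa [PySem.Set.ofList] using h

theorem pvFirstOcc_map_fst (t : List (String × String)) :
    ∀ K, (pvFirstOcc K t).map Prod.fst = pvNewOf K (t.map Prod.fst) := by
  induction t with
  | nil => intro K; simp [pvFirstOcc, pvNewOf]
  | cons p t ih =>
    intro K
    by_cases h : p.1 ∈ K
    · simp [pvFirstOcc, pvNewOf, h, ih]
    · simp [pvFirstOcc, pvNewOf, h, ih]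

theorem pvActs_cons (p : String × String) (ps : List (String × String)) (u : String) :
    pvActs (p :: ps) u = if p.1 = u then p.2 :: pvActs ps u else pvActs ps u := by
  by_cases h : p.1 = u <;> simp [pvActs, h]

theorem pvFirstOcc_spec (t : List (String × String)) :
    ∀ K p, p ∈ pvFirstOcc K t → p.1 ∉ K ∧ ∃ tl, pvActs t p.1 = p.2 :: tl := by
  induction t with
  | nil => intro K p hp; simp [pvFirstOcc] at hp
  | cons q t ih =>
    intro K p hp
    by_cases h : q.1 ∈ K
    · rw [pvFirstOcc, if_pos h] at hp
      obtain ⟨hnk, tl, htl⟩ := ih K p hp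
      have hne : q.1 ≠ p.1 := fun hc => hnk (hc ▸ h)
      exact ⟨hnk, tl, by rw [pvActs_cons, if_neg hne, htl]⟩
    · rw [pvFirstOcc, if_neg h] at hp
      rcases List.mem_cons.mp hp with hp | hp
      · subst hp
        exact ⟨h, pvActs t p.1, by rw [pvActs_cons, if_pos rfl]⟩
      · obtain ⟨hnk, tl, htl⟩ := ih (K ++ [q.1]) p hp
        have hnk' : p.1 ∉ K := fun hc => hnk (by simp [hc])
        have hne : q.1 ≠ p.1 := fun hc => hnk (by simp [hc])
        exact ⟨hnk', tl, by rw [pvActs_cons, if_neg hne, htl]⟩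

-- B's outer loop: a guarded-insert fold appends exactly the first occurrences of unseen users
theorem pvBLoop (ps : List (String × String)) (t : List (String × String)) :
    ∀ (r : PySem.Dict String String),
    (t.foldl (fun result p =>
        if result.contains p.1 then result
        else result.insert p.1 (pvSel ps p)) r).items
      = r.items ++ (pvFirstOcc r.keys t).map (fun p => (p.1, pvSel ps p)) := by
  induction t with
  | nil => intro r; simp [pvFirstOcc]
  | cons p t ih =>
    intro r
    rw [List.foldl_cons]
    by_cases hm : p.1 ∈ r.keys
    · have hc : r.contains p.1 = true := by
        rw [PySem.Dict.contains_eq_decide_mem_keys]; simpa using hm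
      rw [hc, if_pos rfl, pvFirstOcc, if_pos hm, ih r]
    · have hc : r.contains p.1 = false := by
        rw [PySem.Dict.contains_eq_decide_mem_keys]; simpa using hm
      rw [hc]
      simp only [Bool.false_eq_true, if_false]
      rw [ih (r.insert p.1 (pvSel ps p)), pvFirstOcc, if_neg hm]
      have hitems : (r.insert p.1 (pvSel ps p)).items = r.items ++ [(p.1, pvSel ps p)] :=
        PySem.Dict.items_insert_of_not_contains _ _ hc
      have hkeys : (r.insert p.1 (pvSel ps p)).keys = r.keys ++ [p.1] := by
        show (r.insert p.1 (pvSel ps p)).items.map Prod.fst = _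
        rw [hitems]; simp [PySem.Dict.keys]
      rw [hitems, hkeys]
      simp

theorem pvAlt_eq (events : List (List (String × String))) :
    harderUserActivitySummar_alt events
      = (pvFirstOcc [] (pvPairs events)).map (fun p => (p.1, pvSel (pvPairs events) p)) := by
  have h := pvBLoop (pvPairs events) (pvPairs events) PySem.Dict.empty
  simpa [harderUserActivitySummar_alt, pvPairs, pvSel, pvActs, PySem.Dict.keys] using h

-- max with an Int-cast count key equals max with the Nat count key
theorem pvMax?_intCast_aux {k1t k2t : Type} [LT k1t] [DecidableLT k1t] [LT k2t] [DecidableLT k2t]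
    (k1 : String → k1t) (k2 : String → k2t)
    (hiff : ∀ m x, (k1 m < k1 x) ↔ (k2 m < k2 x)) (l : List String) :
    ∀ acc : Option String,
    List.foldl (fun acc x => match acc with
      | none => some x
      | some m => if k1 m < k1 x then some x else some m) acc l
    = List.foldl (fun acc x => match acc with
      | none => some x
      | some m => if k2 m < k2 x then some x else some m) acc l := by
  induction l with
  | nil => intro acc; rfl
  | cons x t ih =>
    intro acc
    rw [List.foldl_cons, List.foldl_cons]
    cases acc with
    | none => exact ih (some x)
    | some m =>
      by_cases h : k2 m < k2 x
      · show List.foldl _ (if k1 m < k1 x then some x else some m) t = List.foldl _ (if k2 m < k2 x then some x else some m) t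
        rw [if_pos ((hiff m x).mpr h), if_pos h]
        exact ih (some x)
      · show List.foldl _ (if k1 m < k1 x then some x else some m) t = List.foldl _ (if k2 m < k2 x then some x else some m) t
        rw [if_neg (fun hc => h ((hiff m x).mp hc)), if_neg h]
        exact ih (some m)

theorem pvMax?_intCast (f : String → Nat) (l : List String) :
    PySem.List.max? l (fun a => ((f a : Nat) : Int)) = PySem.List.max? l f := by
  simp only [PySem.List.max?]
  refine Eq.trans (List.foldl_ext _ _ _ (fun a x _ => by cases a <;> rfl))
    (Eq.trans (pvMax?_intCast_aux (fun a => ((f a : Nat) : Int)) f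
      (fun m x => Nat.cast_lt) l none)
    (Eq.trans (List.foldl_ext _ _ _ (fun a x _ => by cases a <;> rfl)) rfl))

-- max? of a nonempty list is the value-level strict-max scan seeded by the head
theorem pvMax?_cons_aux {kt : Type} [LT kt] [DecidableLT kt] (key : String → kt) (l : List String) :
    ∀ b : String,
    List.foldl (fun acc x => match acc with
      | none => some x
      | some m => if key m < key x then some x else some m) (some b) l
    = some (List.foldl (fun m x => if key m < key x then x else m) b l) := by
  induction l with
  | nil => intro b; rfl
  | cons x t ih =>
    intro b
    rw [List.foldl_cons, List.foldl_cons]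
    show List.foldl _ (if key b < key x then some x else some b) t = _
    split_ifs with h
    · exact ih x
    · exact ih b

theorem pvMax?_cons {kt : Type} [LT kt] [DecidableLT kt] (key : String → kt) (a0 : String) (tl : List String) :
    PySem.List.max? (a0 :: tl) key
      = some (tl.foldl (fun m x => if key m < key x then x else m) a0) := by
  simp only [PySem.List.max?, List.foldl_cons]
  refine Eq.trans (List.foldl_ext _ _ _ ?_) (pvMax?_cons_aux key tl a0)
  intro a x _
  cases a <;> rfl

-- duplicates never win under strict <: the scan over the raw list equals the scan over the fresh part
theorem pvFold_dedup (key : String → Nat) (tl : List String) :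
    ∀ (acc : String) (S : List String), (∀ x ∈ S, key x ≤ key acc) →
    tl.foldl (fun m x => if key m < key x then x else m) acc
      = (pvNewOf S tl).foldl (fun m x => if key m < key x then x else m) acc := by
  induction tl with
  | nil => intro acc S _; rfl
  | cons a t ih =>
    intro acc S hS
    by_cases h : a ∈ S
    · have hle : key a ≤ key acc := hS a h
      rw [pvNewOf, if_pos h, List.foldl_cons, if_neg (by omega)]
      exact ih acc S hS
    · rw [pvNewOf, if_neg h, List.foldl_cons, List.foldl_cons]
      split_ifs with hlt
      · refine ih a (S ++ [a]) ?_
        intro x hx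
        rcases List.mem_append.mp hx with hx | hx
        · exact le_of_lt (lt_of_le_of_lt (hS x hx) hlt)
        · simp at hx; subst hx; exact le_refl _
      · refine ih acc (S ++ [a]) ?_
        intro x hx
        rcases List.mem_append.mp hx with hx | hx
        · exact hS x hx
        · simp at hx; subst hx; omega

-- per user: B's brute-force scan equals A's max over the distinct actions with count keys
theorem pvSel_eq_valA (ps : List (String × String)) (p : String × String) (tl : List String)
    (h : pvActs ps p.1 = p.2 :: tl) :
    ((PySem.List.max? (PySem.Set.ofList (pvActs ps p.1))
        (fun a => (((pvActs ps p.1).count a : Nat) : Int))).getD "") = pvSel ps p := by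
  unfold pvSel
  rw [h]
  set key : String → Nat := fun a => (p.2 :: tl).count a with hkey
  have hset : PySem.Set.ofList (p.2 :: tl) = p.2 :: pvNewOf [p.2] tl := by
    rw [pvOfList_eq_newOf, pvNewOf]
    simp
  rw [pvMax?_intCast key, hset, pvMax?_cons key, Option.getD_some]
  rw [← pvFold_dedup key tl p.2 [p.2] (by intro x hx; simp at hx; subst hx; exact le_refl _)]
  rw [List.foldl_cons, if_neg (by omega)]

-- ===== A-side characterisation (counting fold → counter, items → map over distinct users) =====

theorem pvAHash_getD (ps : List (String × String)) (d : PySem.Dict String (PySem.Dict String Int)) (u : String) :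
    (ps.foldl (fun hm p => hm.insert p.1 ((hm.getD p.1 PySem.Dict.empty).modify p.2 0 (· + 1))) d).getD u PySem.Dict.empty
    = (pvActs ps u).foldl (fun c a => c.modify a 0 (· + 1)) (d.getD u PySem.Dict.empty) := by
  induction ps generalizing d with
  | nil => simp [pvActs]
  | cons p t ih =>
    rw [List.foldl_cons, ih, pvActs_cons]
    by_cases h : p.1 = u
    · subst h
      rw [if_pos rfl, List.foldl_cons, PySem.Dict.getD_insert, if_pos rfl]
    · rw [if_neg h, PySem.Dict.getD_insert, if_neg (fun hc => h hc.symm)]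

theorem pvA_foldl (events : List (List (String × String))) :
    aHashMap events = (pvPairs events).foldl
      (fun hm p => hm.insert p.1 ((hm.getD p.1 PySem.Dict.empty).modify p.2 0 (· + 1)))
      PySem.Dict.empty := by
  rw [pvPairs, List.foldl_map]
  rfl

theorem pvA_getD (events : List (List (String × String))) (u : String) :
    (aHashMap events).getD u PySem.Dict.empty
      = PySem.Dict.counter (pvActs (pvPairs events) u) := by
  rw [pvA_foldl, pvAHash_getD, PySem.Dict.getD_empty, PySem.Dict.counter_eq_foldl]

theorem pvA_nodup (events : List (List (String × String))) : (aHashMap events).keys.Nodup := by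
  rw [pvA_foldl]
  exact PySem.Dict.nodup_keys_foldl_insert_key (l := pvPairs events)
    (key := fun p => p.1)
    (f := fun hm p => (hm.getD p.1 PySem.Dict.empty).modify p.2 0 (· + 1))
    (d := PySem.Dict.empty) (by simp)

theorem pvA_keys (events : List (List (String × String))) :
    (aHashMap events).keys = PySem.Set.ofList ((pvPairs events).map (fun p => p.1)) := by
  rw [pvA_foldl, PySem.Dict.keys_foldl_insert_key]
  simp [PySem.Set.update, PySem.Set.ofList]

theorem pvA_eq (events : List (List (String × String))) :
    harderUserActivitySummar events =
      (PySem.Set.ofList ((pvPairs events).map (fun p => p.1))).map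
        (fun u => (u, ((PySem.List.max? (PySem.Set.ofList (pvActs (pvPairs events) u))
            (fun a => (((pvActs (pvPairs events) u).count a : Nat) : Int))).getD ""))) := by
  unfold harderUserActivitySummar
  have hnd : (aHashMap events).keys.Nodup := pvA_nodup events
  rw [PySem.Dict.items_foldl_insert_fresh ((aHashMap events).items) (fun p => p.1)
      (fun p => (PySem.List.max? p.2.keys (fun k => p.2.getD k 0)).getD "") PySem.Dict.empty
      (by intro a _; simp) hnd]
  rw [show (PySem.Dict.empty : PySem.Dict String String).items = [] from rfl, List.nil_append]
  conv_lhs => rw [PySem.Dict.items_eq_map_keys _ hnd PySem.Dict.empty]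
  rw [List.map_map, pvA_keys]
  apply List.map_congr_left
  intro u _
  simp only [Function.comp_def, pvA_getD, PySem.Dict.keys_counter, PySem.Dict.getD_counter]

-- ===== putting it together =====

theorem pvFinal (events : List (List (String × String))) :
    harderUserActivitySummar events = harderUserActivitySummar_alt events := by
  rw [pvA_eq, pvAlt_eq]
  have husers : PySem.Set.ofList ((pvPairs events).map (fun p => p.1))
      = (pvFirstOcc [] (pvPairs events)).map Prod.fst := by
    rw [pvFirstOcc_map_fst, pvOfList_eq_newOf]
  rw [husers, List.map_map]
  apply List.map_congr_left
  intro p hp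
  obtain ⟨-, tl, htl⟩ := pvFirstOcc_spec (pvPairs events) [] p hp
  simp only [Function.comp_def]
  exact congrArg (fun v => (p.1, v)) (pvSel_eq_valA (pvPairs events) p tl htl)

-- ===== VERDICT (by name: the statement is the Claim_ definition above) =====
theorem harderUserActivitySummar_spec : Claim_equal_harderUserActivitySummar := by
  intro events _ _
  show harderUserActivitySummar events = harderUserActivitySummar_alt events
  exact pvFinal events
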